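-- pv_equiv track=rewrite | github.com/mala-project/mala | mala/descriptors/label_sublib/young.py | is_column_sort
-- ===== SOURCE A (Python) =====
-- def flatten(lstoflsts):
--     try:
--         flat = [i for sublist in lstoflsts for i in sublist]
--         return flat
--     except TypeError:
--         return lstoflsts
--
-- def is_column_sort(partitionfill, strict_col_sort=False):
--     lens = [len(x) for x in partitionfill]
--     ranges = [list(range(ln)) for ln in lens]
--     cols = list(set(flatten(ranges)))
--     bycol = {col: [] for col in cols}
--     for subrange, orbitlst in zip(ranges, partitionfill):
--         for colidx, orbitval in zip(subrange, orbitlst):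
--             bycol[colidx].append(orbitval)
--     coltups = [tuple(bycol[colidx]) for colidx in cols]
--     sortedcols = [tuple(sorted(bycol[colidx])) for colidx in cols]
--     # check to see if columns are sorted
--     sortedcol_flag = all([a == b for a, b in zip(coltups, sortedcols)])
--     if strict_col_sort:
--         sortedcol_flag = sortedcol_flag and all(
--             [len(list(set(a))) == len(a) for a in coltups]
--         )
--     return sortedcol_flag
-- ===== SOURCE B (Python) =====
-- def is_column_sort(partitionfill, strict_col_sort=False):
--     # One pass: remember the last value seen in each column; compare adjacent
--     # column members directly instead of building and sorting every column.
--     last = {}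
--     for row in partitionfill:
--         for j, v in enumerate(row):
--             if j in last:
--                 prev = last[j]
--                 if (prev >= v) if strict_col_sort else (prev > v):
--                     return False
--             last[j] = v
--     return True
-- ===== Notes on version B (the rewrite author's own statement) =====
-- stated objective: faster
-- what changed: Replaces building every column in a dict and sorting each column with a single pass that keeps only the last value seen per column and checks the adjacent-pair order (strict for distinctness) with early exit.
import Mathlib
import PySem

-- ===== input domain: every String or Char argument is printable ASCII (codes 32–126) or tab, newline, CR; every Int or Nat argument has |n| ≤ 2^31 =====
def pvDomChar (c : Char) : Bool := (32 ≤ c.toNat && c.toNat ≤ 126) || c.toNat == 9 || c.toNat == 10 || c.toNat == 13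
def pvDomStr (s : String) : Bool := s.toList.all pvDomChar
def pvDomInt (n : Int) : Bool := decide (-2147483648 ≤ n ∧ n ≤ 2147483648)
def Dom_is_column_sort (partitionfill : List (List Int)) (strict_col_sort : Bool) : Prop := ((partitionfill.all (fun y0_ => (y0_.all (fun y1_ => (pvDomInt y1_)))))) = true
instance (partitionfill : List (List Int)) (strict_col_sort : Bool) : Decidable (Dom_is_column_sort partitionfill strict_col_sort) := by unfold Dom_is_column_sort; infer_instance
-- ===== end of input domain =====

-- B replaces the build-every-column-then-sort check by a single adjacent-pair scan
-- that keeps only the last value seen per column (O(N) instead of sorting).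

-- ===== PORT A =====
-- flatten: the TypeError branch is unreachable for List (List Int) inputs
def pvFlatten (lstoflsts : List (List Int)) : List Int :=
  lstoflsts.flatMap (fun sublist => sublist)

def is_column_sort (partitionfill : List (List Int)) (strict_col_sort : Bool) : Bool :=
  let lens := partitionfill.map (fun x => (x.length : Int))
  let ranges := lens.map (fun ln => PySem.List.pyRange 0 ln 1)
  let cols : List Int := PySem.Set.ofList (pvFlatten ranges)
  let bycol0 : PySem.Dict Int (List Int) :=
    cols.foldl (fun d col => d.insert col []) PySem.Dict.empty
  let bycol :=
    (ranges.zip partitionfill).foldl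
      (fun d p =>
        (p.1.zip p.2).foldl (fun d q => d.modify q.1 [] (fun l => l ++ [q.2])) d)
      bycol0
  -- bycol[colidx]: the key is always present, so getD with [] is exact
  let coltups := cols.map (fun colidx => bycol.getD colidx [])
  let sortedcols := cols.map (fun colidx => PySem.List.sorted (bycol.getD colidx []) (fun x => x) false)
  let sortedcol_flag := ((coltups.zip sortedcols).map (fun p => decide (p.1 = p.2))).all (fun b => b)
  if strict_col_sort then
    sortedcol_flag &&
      (coltups.map (fun a => decide ((PySem.Set.ofList a).length = a.length))).all (fun b => b)
  else sortedcol_flag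

-- ===== PORT B =====
-- inner loop of B: one row; returns none on early `return False`
def pvChkRow (strict_col_sort : Bool) (last : PySem.Dict Int Int) :
    List (Int × Int) → Option (PySem.Dict Int Int)
  | [] => some last
  | (j, v) :: rest =>
    match last.get? j with
    | some prev =>
      if (if strict_col_sort then prev ≥ v else prev > v) then none
      else pvChkRow strict_col_sort (last.insert j v) rest
    | none => pvChkRow strict_col_sort (last.insert j v) rest

def pvChkRows (strict_col_sort : Bool) (last : PySem.Dict Int Int) :
    List (List Int) → Bool
  | [] => true
  | row :: rest =>
    match pvChkRow strict_col_sort last (PySem.List.enumerate row 0) with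
    | none => false
    | some last' => pvChkRows strict_col_sort last' rest

def is_column_sort_alt (partitionfill : List (List Int)) (strict_col_sort : Bool) : Bool :=
  pvChkRows strict_col_sort PySem.Dict.empty partitionfill

-- ===== PRECONDITION & SPEC =====
def Spec_is_column_sort (partitionfill : List (List Int)) (strict_col_sort : Bool) (out : Bool) : Prop := out = is_column_sort_alt partitionfill strict_col_sort
instance (partitionfill : List (List Int)) (strict_col_sort : Bool) (out : Bool) : Decidable (Spec_is_column_sort partitionfill strict_col_sort out) := by unfold Spec_is_column_sort; infer_instance

-- ===== CLAIM (what is proved, stated in full; the proofs are below) =====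
def Claim_equal_is_column_sort : Prop := ∀ (partitionfill : List (List Int)) (strict_col_sort : Bool), Dom_is_column_sort partitionfill strict_col_sort → Spec_is_column_sort partitionfill strict_col_sort (is_column_sort partitionfill strict_col_sort)

-- ===== LEMMAS AND PROOFS =====

-- the comparison B enforces between consecutive members of a column
def pvCmpB (strict : Bool) (a b : Int) : Bool := if strict then a < b else a ≤ b
def pvCmp (strict : Bool) (a b : Int) : Prop := pvCmpB strict a b = true

-- the list of values in column c, top to bottom
def pvCol (pf : List (List Int)) (c : Int) : List Int :=
  ((pf.flatMap (fun row => PySem.List.enumerate row 0)).filter (fun p => p.1 == c)).map (·.2)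

def pvOkFrom (strict : Bool) (o : Option Int) (l : List Int) : Prop :=
  List.IsChain (pvCmp strict) (o.toList ++ l)

lemma pv_all_congr {α : Type} (l : List α) (f g : α → Bool)
    (h : ∀ x ∈ l, f x = g x) : l.all f = l.all g := by
  induction l with
  | nil => rfl
  | cons x xs ih =>
    simp only [List.all_cons, h x (List.mem_cons_self), ih (fun y hy => h y (List.mem_cons_of_mem _ hy))]

lemma pv_get?_insert_ne (d : PySem.Dict Int Int) (k k' : Int) (v : Int) (h : k' ≠ k) :
    (d.insert k v).get? k' = d.get? k' := by
  rw [PySem.Dict.get?_insert]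
  simp [h]

lemma pvCol_nil (c : Int) : pvCol [] c = [] := rfl

lemma pvCol_cons (row : List Int) (rest : List (List Int)) (c : Int) :
    pvCol (row :: rest) c =
      ((PySem.List.enumerate row 0).filter (fun p => p.1 == c)).map (·.2) ++ pvCol rest c := by
  simp [pvCol, List.flatMap_cons]

-- B side --------------------------------------------------------------

lemma pvChkRow_eq (strict : Bool) (ps : List (Int × Int)) (last : PySem.Dict Int Int)
    (h : (ps.map (·.1)).Nodup) :
    pvChkRow strict last ps =
      if ps.all (fun p => (last.get? p.1).all (fun prev => pvCmpB strict prev p.2)) then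
        some (ps.foldl (fun d p => d.insert p.1 p.2) last)
      else none := by
  induction ps generalizing last with
  | nil => simp [pvChkRow]
  | cons p rest ih =>
    obtain ⟨j, v⟩ := p
    simp only [List.map_cons, List.nodup_cons] at h
    rw [pvChkRow]
    cases hg : last.get? j with
    | none =>
      rw [ih _ h.2]
      simp only [List.all_cons, hg, Option.all_none, Bool.true_and, List.foldl_cons]
      have hcond : (rest.all fun p => ((last.insert j v).get? p.1).all (fun prev => pvCmpB strict prev p.2)) = (rest.all fun p => (last.get? p.1).all (fun prev => pvCmpB strict prev p.2)) :=
        pv_all_congr _ _ _ (fun q hq => by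
          have hne : q.1 ≠ j := fun hqj => h.1 (by rw [← hqj]; exact List.mem_map_of_mem (f := fun x => x.1) hq)
          rw [pv_get?_insert_ne last j q.1 v hne])
      simp only [hcond]
    | some prev =>
      by_cases hb : (if strict then prev ≥ v else prev > v)
      · simp only [hb, if_pos, reduceIte]
        have : (last.get? j).all (fun prev => pvCmpB strict prev v) = false := by
          rw [hg]
          simp only [Option.all_some, pvCmpB]
          cases strict <;> simp_all <;> omega
        simp [this]
      · simp only [hb, reduceIte]
        rw [ih _ h.2]
        have : (last.get? j).all (fun prev => pvCmpB strict prev v) = true := by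
          rw [hg]
          simp only [Option.all_some, pvCmpB]
          cases strict <;> simp_all <;> omega
        simp only [List.all_cons, this, Bool.true_and, List.foldl_cons]
        have hcond : (rest.all fun p => ((last.insert j v).get? p.1).all (fun prev => pvCmpB strict prev p.2)) = (rest.all fun p => (last.get? p.1).all (fun prev => pvCmpB strict prev p.2)) :=
          pv_all_congr _ _ _ (fun q hq => by
            have hne : q.1 ≠ j := fun hqj => h.1 (by rw [← hqj]; exact List.mem_map_of_mem (f := fun x => x.1) hq)
            rw [pv_get?_insert_ne last j q.1 v hne])
        simp only [hcond]

lemma get?_foldl_insert_of_not_mem (ps : List (Int × Int)) (d : PySem.Dict Int Int) (c : Int)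
    (h : c ∉ ps.map (·.1)) :
    (ps.foldl (fun d p => d.insert p.1 p.2) d).get? c = d.get? c := by
  induction ps generalizing d with
  | nil => rfl
  | cons p rest ih =>
    simp only [List.map_cons, List.mem_cons, not_or] at h
    rw [List.foldl_cons, ih _ h.2, pv_get?_insert_ne _ _ _ _ h.1]

lemma get?_foldl_insert_nodup (ps : List (Int × Int)) (d : PySem.Dict Int Int) (c : Int)
    (h : (ps.map (·.1)).Nodup) :
    (ps.foldl (fun d p => d.insert p.1 p.2) d).get? c =
      match ps.find? (fun p => p.1 == c) with
      | some p => some p.2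
      | none => d.get? c := by
  induction ps generalizing d with
  | nil => rfl
  | cons p rest ih =>
    simp only [List.map_cons, List.nodup_cons] at h
    rw [List.foldl_cons]
    by_cases hc : p.1 = c
    · have hrest : c ∉ rest.map (·.1) := hc ▸ h.1
      rw [get?_foldl_insert_of_not_mem _ _ _ hrest]
      have hf : rest.find? (fun q => q.1 == c) = none := by
        rw [List.find?_eq_none]
        intro q hq hbeq
        exact hrest ((eq_of_beq hbeq) ▸ List.mem_map_of_mem hq)
      simp [List.find?_cons, hc, hf, hc ▸ PySem.Dict.get?_insert_self d p.1 p.2]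
    · rw [ih _ h.2]
      have : (p.1 == c) = false := by simpa using hc
      simp only [List.find?_cons, this]
      cases rest.find? (fun q => q.1 == c) with
      | some q => rfl
      | none => exact pv_get?_insert_ne _ _ _ _ (fun h' => hc h'.symm)

lemma filter_eq_find?_toList (ps : List (Int × Int)) (c : Int) (h : (ps.map (·.1)).Nodup) :
    ps.filter (fun p => p.1 == c) = (ps.find? (fun p => p.1 == c)).toList := by
  induction ps with
  | nil => rfl
  | cons p rest ih =>
    simp only [List.map_cons, List.nodup_cons] at h
    by_cases hc : p.1 = c
    · have hf : rest.filter (fun q => q.1 == c) = [] := by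
        rw [List.filter_eq_nil_iff]
        intro q hq hbeq
        exact (hc ▸ h.1) ((eq_of_beq hbeq) ▸ List.mem_map_of_mem hq)
      simp [List.filter_cons, List.find?_cons, hc, hf]
    · have : (p.1 == c) = false := by simpa using hc
      simp only [List.filter_cons, List.find?_cons, this, Bool.false_eq_true, reduceIte]
      exact ih h.2

lemma nodup_fst_enumerate (row : List Int) :
    ((PySem.List.enumerate row 0).map (·.1)).Nodup := by
  rw [PySem.List.map_fst_enumerate]
  exact PySem.List.nodup_pyRange_one _ _

lemma okFrom_append_cons (strict : Bool) (o : Option Int) (v : Int) (l : List Int) :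
    pvOkFrom strict o (v :: l) ↔
      (∀ prev ∈ o, pvCmp strict prev v) ∧ pvOkFrom strict (some v) l := by
  cases o <;> simp [pvOkFrom, List.isChain_cons]

lemma okFrom_nil (strict : Bool) (o : Option Int) : pvOkFrom strict o [] := by
  cases o <;> simp [pvOkFrom]

lemma pvChkRows_iff (strict : Bool) (pf : List (List Int)) (last : PySem.Dict Int Int) :
    pvChkRows strict last pf = true ↔ ∀ c, pvOkFrom strict (last.get? c) (pvCol pf c) := by
  induction pf generalizing last with
  | nil => simp [pvChkRows, pvCol_nil, okFrom_nil]
  | cons row rest ih =>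
    have hnd := nodup_fst_enumerate row
    rw [pvChkRows, pvChkRow_eq strict _ last hnd]
    by_cases hcond : ((PySem.List.enumerate row 0).all
        fun p => ((last.get? p.1).all fun prev => pvCmpB strict prev p.2)) = true
    · rw [if_pos hcond]
      rw [ih]
      refine forall_congr' (fun c => ?_)
      rw [get?_foldl_insert_nodup _ _ _ hnd, pvCol_cons,
        filter_eq_find?_toList _ _ hnd]
      cases hf : (PySem.List.enumerate row 0).find? (fun p => p.1 == c) with
      | none => simp
      | some p =>
        have hpc : p.1 = c := by have := List.find?_some hf; simpa using this
        have hpmem : p ∈ PySem.List.enumerate row 0 := List.mem_of_find?_eq_some hf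
        have hlink : ∀ prev ∈ last.get? c, pvCmp strict prev p.2 := by
          intro prev hprev
          have := (List.all_eq_true.mp hcond) p hpmem
          rw [hpc] at this
          rw [hprev] at this
          simpa [pvCmp] using this
        simp only [Option.toList_some, List.map_cons, List.map_nil, List.singleton_append]
        rw [okFrom_append_cons]
        exact ⟨fun h => ⟨hlink, h⟩, fun h => h.2⟩
    · rw [if_neg hcond]
      simp only [Bool.false_eq_true, false_iff, not_forall]
      rw [List.all_eq_true] at hcond
      push_neg at hcond
      obtain ⟨p, hpmem, hpbad⟩ := hcond
      refine ⟨p.1, ?_⟩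
      intro hok
      cases hg : last.get? p.1 with
      | none => exact hpbad (by rw [hg]; rfl)
      | some prev =>
        replace hpbad : pvCmpB strict prev p.2 ≠ true := by
          intro hcb; exact hpbad (by rw [hg]; simpa using hcb)
        have hfind : (PySem.List.enumerate row 0).find? (fun q => q.1 == p.1) = some p := by
          have hpf : p ∈ (PySem.List.enumerate row 0).filter (fun q => q.1 == p.1) :=
            List.mem_filter.mpr ⟨hpmem, by simp⟩
          rw [filter_eq_find?_toList _ _ hnd] at hpf
          cases hf : (PySem.List.enumerate row 0).find? (fun q => q.1 == p.1) with
          | none => rw [hf] at hpf; simp at hpf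
          | some q => rw [hf] at hpf; simp_all
        rw [pvCol_cons, filter_eq_find?_toList _ _ hnd, hfind] at hok
        simp only [Option.toList_some, List.map_cons, List.map_nil, List.singleton_append] at hok
        rw [okFrom_append_cons] at hok
        exact hpbad (hok.1 prev (by rw [hg]; rfl))

lemma alt_iff (pf : List (List Int)) (strict : Bool) :
    is_column_sort_alt pf strict = true ↔ ∀ c, List.IsChain (pvCmp strict) (pvCol pf c) := by
  rw [is_column_sort_alt, pvChkRows_iff]
  refine forall_congr' (fun c => ?_)
  rw [PySem.Dict.get?_empty]
  simp [pvOkFrom]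

-- A side --------------------------------------------------------------

lemma pv_zip_map_self (l : List (List Int)) (f : List Int → List Int) :
    (l.map f).zip l = l.map (fun x => (f x, x)) := by
  induction l with
  | nil => rfl
  | cons x xs ih => simp [ih]

lemma pv_zip_range (r : List Int) (s : Int) :
    (PySem.List.pyRange s (s + r.length) 1).zip r = PySem.List.enumerate r s := by
  induction r generalizing s with
  | nil => simp [PySem.List.pyRange_one_eq_nil]
  | cons x xs ih =>
    have h1 : s < s + ((x :: xs).length : Int) := by simp only [List.length_cons]; push_cast; omega
    rw [PySem.List.pyRange_one_cons h1]
    have h2 : s + (((x :: xs).length : Nat) : Int) = (s + 1) + (xs.length : Int) := by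
      simp only [List.length_cons]; push_cast; ring
    rw [h2, List.zip_cons_cons, ih (s + 1), PySem.List.enumerate_cons]

lemma pv_zip_range0 (r : List Int) :
    (PySem.List.pyRange 0 (r.length : Int) 1).zip r = PySem.List.enumerate r 0 := by
  have h := pv_zip_range r 0
  rw [zero_add] at h
  exact h

lemma pvFlatten_map (l : List (List Int)) (f : List Int → List Int) :
    pvFlatten (l.map f) = l.flatMap f := by
  simp only [pvFlatten]
  rw [List.flatMap_def, List.flatMap_def, List.map_map]
  rfl

lemma pv_getD_init (cols : List Int) (d : PySem.Dict Int (List Int))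
    (h : ∀ k, d.getD k [] = []) (k : Int) :
    (cols.foldl (fun d c => d.insert c []) d).getD k [] = [] := by
  induction cols generalizing d with
  | nil => exact h k
  | cons c cs ih =>
    rw [List.foldl_cons]
    refine ih _ (fun k' => ?_)
    rw [PySem.Dict.getD_insert]
    split <;> simp [h]

lemma pv_bycol (l : List (Int × Int)) (d : PySem.Dict Int (List Int))
    (h : ∀ k, d.getD k [] = []) (c : Int) :
    (l.foldl (fun d p => d.modify p.1 [] (fun ls => ls ++ [p.2])) d).getD c [] =
      (l.filter (fun p => p.1 == c)).map (·.2) := by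
  rw [PySem.Dict.getD_foldl_modify_append, h]
  simp

lemma pv_sorted_iff (l : List Int) :
    l = PySem.List.sorted l (fun x => x) false ↔ List.Pairwise (· ≤ ·) l := by
  constructor
  · intro h
    have hp := PySem.List.sorted_pairwise (xs := l) (key := fun x => x)
    rw [← h] at hp
    simpa using hp
  · intro h
    exact (PySem.List.sorted_eq_self_of_pairwise l (fun x => x) (by simpa using h)).symm

lemma pv_set_len_iff (xs : List Int) :
    (PySem.Set.ofList xs).length = xs.length ↔ xs.Nodup := by
  have hperm : (PySem.Set.ofList xs).Perm xs.dedup := by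
    rw [List.perm_ext_iff_of_nodup (PySem.Set.nodup_ofList xs) (List.nodup_dedup xs)]
    intro a
    rw [PySem.Set.mem_ofList, List.mem_dedup]
  rw [hperm.length_eq]
  constructor
  · intro h
    exact List.dedup_eq_self.mp ((List.dedup_sublist xs).eq_of_length h)
  · intro h
    rw [List.dedup_eq_self.mpr h]

lemma pv_col_out (pf : List (List Int)) (c : Int)
    (h : c ∉ pf.flatMap (fun r => PySem.List.pyRange 0 (r.length : Int) 1)) :
    pvCol pf c = [] := by
  rw [pvCol, List.map_eq_nil_iff, List.filter_eq_nil_iff]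
  intro p hp hbeq
  obtain ⟨row, hrow, hpe⟩ := List.mem_flatMap.mp hp
  refine h (List.mem_flatMap.mpr ⟨row, hrow, ?_⟩)
  have hc : p.1 = c := by simpa using hbeq
  have : p.1 ∈ (PySem.List.enumerate row 0).map (·.1) := List.mem_map_of_mem (f := fun x => x.1) hpe
  rw [PySem.List.map_fst_enumerate, zero_add] at this
  rwa [hc] at this

lemma a_iff (pf : List (List Int)) (strict : Bool) :
    is_column_sort pf strict = true ↔
      ((∀ c, List.Pairwise (· ≤ ·) (pvCol pf c)) ∧
        (strict = true → ∀ c, (pvCol pf c).Nodup)) := by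
  rw [is_column_sort]
  have hranges : (pf.map (fun x => (x.length : Int))).map (fun ln => PySem.List.pyRange 0 ln 1) =
      pf.map (fun r => PySem.List.pyRange 0 (r.length : Int) 1) := by
    rw [List.map_map]; rfl
  rw [hranges, pvFlatten_map, pv_zip_map_self, List.foldl_map]
  have hbody : (fun (d : PySem.Dict Int (List Int)) (r : List Int) =>
        (((PySem.List.pyRange 0 (r.length : Int) 1).zip r).foldl
          (fun d q => d.modify q.1 [] (fun l => l ++ [q.2])) d)) =
      (fun d r => ((PySem.List.enumerate r 0).foldl
          (fun d q => d.modify q.1 [] (fun l => l ++ [q.2])) d)) := by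
    funext d r
    rw [pv_zip_range0]
  rw [hbody, ← List.foldl_flatMap]
  have hgetD : ∀ c, ((pf.flatMap (fun r => PySem.List.enumerate r 0)).foldl
      (fun d p => d.modify p.1 [] (fun ls => ls ++ [p.2]))
      ((PySem.Set.ofList (pf.flatMap (fun r => PySem.List.pyRange 0 (r.length : Int) 1))).foldl
        (fun d col => d.insert col []) PySem.Dict.empty)).getD c [] = pvCol pf c := by
    intro c
    rw [pv_bycol _ _ (fun k => pv_getD_init _ _ (fun k' => rfl) k) c]
    rfl
  simp only [hgetD]
  rw [List.zip_map', List.map_map, List.map_map]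
  set cols := PySem.Set.ofList (pf.flatMap (fun r => PySem.List.pyRange 0 (r.length : Int) 1)) with hcols
  have hflag : (cols.map ((fun p => decide (p.1 = p.2)) ∘ fun c =>
        (pvCol pf c, PySem.List.sorted (pvCol pf c) (fun x => x) false))).all (fun b => b) = true ↔
      ∀ c, List.Pairwise (· ≤ ·) (pvCol pf c) := by
    rw [List.all_map, List.all_eq_true]
    constructor
    · intro h c
      by_cases hc : c ∈ cols
      · have := h c hc
        simp only [Function.comp_apply, decide_eq_true_eq] at this
        exact (pv_sorted_iff _).mp this
      · rw [pv_col_out pf c (fun hmem => hc ((PySem.Set.mem_ofList _ _).mpr hmem))]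
        exact List.Pairwise.nil
    · intro h c _
      simp only [Function.comp_apply, decide_eq_true_eq]
      exact (pv_sorted_iff _).mpr (h c)
  have hnod : (cols.map ((fun a => decide ((PySem.Set.ofList a).length = a.length)) ∘ fun c =>
        pvCol pf c)).all (fun b => b) = true ↔ ∀ c, (pvCol pf c).Nodup := by
    rw [List.all_map, List.all_eq_true]
    constructor
    · intro h c
      by_cases hc : c ∈ cols
      · have := h c hc
        simp only [Function.comp_apply, decide_eq_true_eq] at this
        exact (pv_set_len_iff _).mp this
      · rw [pv_col_out pf c (fun hmem => hc ((PySem.Set.mem_ofList _ _).mpr hmem))]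
        exact List.nodup_nil
    · intro h c _
      simp only [Function.comp_apply, decide_eq_true_eq]
      exact (pv_set_len_iff _).mpr (h c)
  cases strict with
  | false =>
    simp only [Bool.false_eq_true, if_false, false_implies, and_true]
    exact hflag
  | true =>
    simp only [if_true, Bool.and_eq_true, forall_const]
    rw [hflag, hnod]

-- bridge --------------------------------------------------------------

lemma chain_iff_pairwise_strict (l : List Int) :
    List.IsChain (pvCmp true) l ↔ (List.Pairwise (· ≤ ·) l ∧ l.Nodup) := by
  have hrel : pvCmp true = (fun a b : Int => a < b) := by
    funext a b; exact propext (by simp [pvCmp, pvCmpB])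
  rw [hrel, List.isChain_iff_pairwise]
  constructor
  · intro h
    exact ⟨h.imp (fun hab => le_of_lt hab), h.imp (fun hab => ne_of_lt hab)⟩
  · rintro ⟨h1, h2⟩
    exact (h1.and h2).imp (fun hab => lt_of_le_of_ne hab.1 hab.2)

lemma chain_iff_pairwise_lax (l : List Int) :
    List.IsChain (pvCmp false) l ↔ List.Pairwise (· ≤ ·) l := by
  have hrel : pvCmp false = (fun a b : Int => a ≤ b) := by
    funext a b; exact propext (by simp [pvCmp, pvCmpB])
  rw [hrel, List.isChain_iff_pairwise]

-- ===== VERDICT (by name: the statement is the Claim_ definition above) =====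
theorem is_column_sort_spec : Claim_equal_is_column_sort := by
  intro pf strict _
  unfold Spec_is_column_sort
  rw [← Bool.coe_iff_coe, a_iff, alt_iff]
  cases strict
  · simp only [Bool.false_eq_true, false_implies, and_true]
    exact (forall_congr' fun c => (chain_iff_pairwise_lax _)).symm
  · constructor
    · rintro ⟨h1, h2⟩ c
      exact (chain_iff_pairwise_strict _).mpr ⟨h1 c, h2 rfl c⟩
    · intro h
      refine ⟨fun c => ((chain_iff_pairwise_strict _).mp (h c)).1,
              fun _ c => ((chain_iff_pairwise_strict _).mp (h c)).2⟩
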